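-- pv_equiv track=rewrite | github.com/przemyslaw-junior/SI_lab | lab_3/lab_3.py | heuristic_HDOD
-- ===== SOURCE A (Python) =====
-- def heuristic_HDOD(state, N):
--     total_diff = 0
--     for i in range(len(state)):
--         for j in range(len(state)):
--             qx1, qy1 = state[i]
--             qx2, qy2 = state[j]
--             dist = abs(qx1 - qx2) + abs (qy1 - qy2)
--             total_diff += abs(dist - 3)
--     return total_diff
-- ===== SOURCE B (Python) =====
-- def heuristic_HDOD(state, N):
--     n = len(state)
--
--     def pair_abs_sum(vals):
--         # sum of |u - v| over all ordered pairs, via sorting + suffix sums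
--         vals = sorted(vals)
--         total = 0
--         rem_sum = sum(vals)
--         rem_cnt = n
--         for v in vals:
--             rem_sum -= v
--             rem_cnt -= 1
--             total += rem_sum - rem_cnt * v
--         return 2 * total
--
--     dist_sum = pair_abs_sum([p[0] for p in state]) + pair_abs_sum([p[1] for p in state])
--
--     cnt = {}
--     for p in state:
--         cnt[p] = cnt.get(p, 0) + 1
--
--     near = 0
--     for (x, y) in state:
--         for dx in range(-2, 3):
--             for dy in range(-2, 3):
--                 w = 3 - abs(dx) - abs(dy)
--                 if w > 0:
--                     near += w * cnt.get((x + dx, y + dy), 0)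
--
--     return dist_sum - 3 * n * n + 2 * near
-- ===== Notes on version B (the rewrite author's own statement) =====
-- stated objective: faster
-- what changed: Replaces the O(n^2) all-pairs loop by the identity |d-3| = d - 3 + 2*max(0,3-d): the total Manhattan distance is computed separably per coordinate with sorting and suffix sums, and the near pairs (distance < 3) are counted with a hash map of point multiplicities probed at the 13 offsets within distance 2.
import Mathlib
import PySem

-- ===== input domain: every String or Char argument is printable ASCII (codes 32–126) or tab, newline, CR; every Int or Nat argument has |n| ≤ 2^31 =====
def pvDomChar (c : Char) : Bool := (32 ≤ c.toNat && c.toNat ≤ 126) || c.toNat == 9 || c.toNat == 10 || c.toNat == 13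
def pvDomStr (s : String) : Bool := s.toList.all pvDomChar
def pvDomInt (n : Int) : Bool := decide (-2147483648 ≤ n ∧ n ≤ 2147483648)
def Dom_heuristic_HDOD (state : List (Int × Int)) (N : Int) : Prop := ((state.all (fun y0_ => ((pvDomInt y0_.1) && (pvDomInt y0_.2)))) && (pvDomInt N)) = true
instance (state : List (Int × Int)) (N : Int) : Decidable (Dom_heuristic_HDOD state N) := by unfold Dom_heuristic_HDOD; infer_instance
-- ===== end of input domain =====

-- B replaces A's all-pairs double loop by a sorted separable distance sum plus a hashed
-- count of pairs at Manhattan distance < 3 (a different, asymptotically faster algorithm).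


-- ===== PORT A =====
-- state[i]/state[j] with i, j drawn from range(len(state)) are always in range,
-- so PySem.List.pyGetD is exact here.
def heuristic_HDOD (state : List (Int × Int)) (N : Int) : Int :=
  (PySem.List.pyRange 0 state.length 1).foldl (fun total_diff i =>
    (PySem.List.pyRange 0 state.length 1).foldl (fun total_diff j =>
      let p1 := PySem.List.pyGetD state i ((0 : Int), (0 : Int))
      let p2 := PySem.List.pyGetD state j ((0 : Int), (0 : Int))
      let dist := |p1.1 - p2.1| + |p1.2 - p2.2|
      total_diff + |dist - 3|) total_diff) 0

-- ===== PORT B =====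
-- helper pair_abs_sum(vals) of Source B: sorted vals, then one pass with suffix sum/count
def pvPairAbsSum (n : Int) (vals : List Int) : Int :=
  let sortedVals := PySem.List.sorted vals (fun v => v) false
  let st := sortedVals.foldl
    (fun (st : Int × Int × Int) v =>
      let rem_sum := st.1 - v
      let rem_cnt := st.2.1 - 1
      (rem_sum, rem_cnt, st.2.2 + (rem_sum - rem_cnt * v)))
    (vals.sum, n, 0)
  2 * st.2.2

def heuristic_HDOD_alt (state : List (Int × Int)) (N : Int) : Int :=
  let n : Int := state.length
  let dist_sum := pvPairAbsSum n (state.map (·.1)) + pvPairAbsSum n (state.map (·.2))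
  let cnt : PySem.Dict (Int × Int) Int :=
    state.foldl (fun d p => d.insert p (d.getD p 0 + 1)) PySem.Dict.empty
  let near := state.foldl (fun near p =>
    (PySem.List.pyRange (-2) 3 1).foldl (fun near dx =>
      (PySem.List.pyRange (-2) 3 1).foldl (fun near dy =>
        let w := 3 - |dx| - |dy|
        if w > 0 then near + w * cnt.getD (p.1 + dx, p.2 + dy) 0 else near) near) near) 0
  dist_sum - 3 * n * n + 2 * near

-- ===== PRECONDITION & SPEC =====
def Spec_heuristic_HDOD (state : List (Int × Int)) (N : Int) (out : Int) : Prop := out = heuristic_HDOD_alt state N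
instance (state : List (Int × Int)) (N : Int) (out : Int) : Decidable (Spec_heuristic_HDOD state N out) := by unfold Spec_heuristic_HDOD; infer_instance

-- ===== CLAIM (what is proved, stated in full; the proofs are below) =====
def Claim_equal_heuristic_HDOD : Prop := ∀ (state : List (Int × Int)) (N : Int), Dom_heuristic_HDOD state N → Spec_heuristic_HDOD state N (heuristic_HDOD state N)

-- ===== LEMMAS AND PROOFS =====

-- double sum over ordered pairs drawn from a list
def pvDSum (l : List (Int × Int)) (f : Int × Int → Int × Int → Int) : Int :=
  (l.map (fun p => (l.map (fun q => f p q)).sum)).sum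

-- the "near" weight of an ordered pair: max(0, 3 - manhattan distance)
def pvG (p q : Int × Int) : Int :=
  if |p.1 - q.1| + |p.2 - q.2| ≤ 2 then 3 - (|p.1 - q.1| + |p.2 - q.2|) else 0

-- half of the ordered-pair |x - y| sum of a sorted list, head-recursively
def pvHalfS : List Int → Int
  | [] => 0
  | v :: t => (t.sum - t.length * v) + pvHalfS t

theorem pvSumComm {α β : Type} (l : List α) (m : List β) (f : α → β → Int) :
    (l.map (fun x => (m.map (f x)).sum)).sum = (m.map (fun y => (l.map (fun x => f x y)).sum)).sum := by
  induction l with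
  | nil => simp
  | cons x l ih =>
    simp only [List.map_cons, List.sum_cons, ih]
    rw [← PySem.List.sum_map_add_int m (f x) (fun y => (l.map (fun x => f x y)).sum)]

theorem pvCountSum (l : List (Int × Int)) (v : Int × Int) :
    ((l.count v : Nat) : Int) = (l.map (fun q => if q = v then (1 : Int) else 0)).sum := by
  induction l with
  | nil => simp
  | cons x l ih =>
    simp only [List.count_cons, List.map_cons, List.sum_cons]
    by_cases hx : x = v
    · simp [hx, ← ih]; omega
    · simp [hx, Ne.symm, ← ih]

theorem pvFoldlIteAdd {α : Type} (l : List α) (p : α → Prop) [DecidablePred p] (g : α → Int) (a : Int) :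
    l.foldl (fun acc x => if p x then acc + g x else acc) a
      = a + (l.map (fun x => if p x then g x else 0)).sum := by
  have h : (fun (acc : Int) x => if p x then acc + g x else acc)
      = fun acc x => acc + (if p x then g x else 0) := by
    funext acc x; split <;> simp
  rw [h, PySem.List.foldl_add]

-- the 13-offset indicator sum evaluates to the near weight
theorem pvL4 (p1 p2 q1 q2 : Int) :
    ((PySem.List.pyRange (-2) 3 1).map (fun dx =>
      ((PySem.List.pyRange (-2) 3 1).map (fun dy =>
        if 3 - |dx| - |dy| > 0 then
          (3 - |dx| - |dy|) * (if q1 = p1 + dx ∧ q2 = p2 + dy then (1:Int) else 0)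
        else 0)).sum)).sum
    = pvG (p1, p2) (q1, q2) := by
  obtain ⟨a, rfl⟩ : ∃ a, q1 = p1 + a := ⟨q1 - p1, by ring⟩
  obtain ⟨b, rfl⟩ : ∃ b, q2 = p2 + b := ⟨q2 - p2, by ring⟩
  have hg : pvG (p1, p2) (p1 + a, p2 + b) = if |a| + |b| ≤ 2 then 3 - (|a| + |b|) else 0 := by
    unfold pvG
    have h1 : p1 - (p1 + a) = -a := by ring
    have h2 : p2 - (p2 + b) = -b := by ring
    simp [h1, h2]
  rw [hg]
  by_cases hab : (-2 ≤ a ∧ a ≤ 2) ∧ (-2 ≤ b ∧ b ≤ 2)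
  · obtain ⟨⟨ha1, ha2⟩, hb1, hb2⟩ := hab
    have hR : PySem.List.pyRange (-2) 3 1 = [-2, -1, 0, 1, 2] := by decide
    rw [hR]
    simp only [List.map_cons, List.map_nil, List.sum_cons, List.sum_nil, add_right_inj]
    interval_cases a <;> interval_cases b <;> decide
  · rw [if_neg (by simp only [Int.abs_eq_natAbs] at *; omega)]
    apply List.sum_eq_zero
    intro x hxm
    rcases List.mem_map.mp hxm with ⟨dx, hdx, rfl⟩
    apply List.sum_eq_zero
    intro y hym
    rcases List.mem_map.mp hym with ⟨dy, hdy, rfl⟩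
    rw [PySem.List.mem_pyRange_one] at hdx hdy
    split_ifs with h1 h2
    · exfalso
      obtain ⟨hea, heb⟩ := h2
      have ha : a = dx := by omega
      have hb : b = dy := by omega
      simp only [Int.abs_eq_natAbs] at h1 hab
      omega
    · ring
    · rfl

-- A's nested index loops are the double sum of |dist - 3|
theorem pvA_eq_dsum (state : List (Int × Int)) (N : Int) :
    heuristic_HDOD state N = pvDSum state (fun p q => |(|p.1 - q.1| + |p.2 - q.2|) - 3|) := by
  unfold heuristic_HDOD pvDSum
  rw [PySem.List.foldl_pyRange_zero_pyGetD' state ((0 : Int), (0 : Int))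
      (fun td p1 => (PySem.List.pyRange 0 (state.length : Int) 1).foldl
        (fun td j => td + |(|p1.1 - (PySem.List.pyGetD state j ((0:Int),(0:Int))).1| +
            |p1.2 - (PySem.List.pyGetD state j ((0:Int),(0:Int))).2|) - 3|) td) 0]
  have h1 : ∀ (p1 : Int × Int) (acc : Int),
      (PySem.List.pyRange 0 (state.length : Int) 1).foldl
        (fun td j => td + |(|p1.1 - (PySem.List.pyGetD state j ((0:Int),(0:Int))).1| +
            |p1.2 - (PySem.List.pyGetD state j ((0:Int),(0:Int))).2|) - 3|) acc
      = acc + (state.map (fun q => |(|p1.1 - q.1| + |p1.2 - q.2|) - 3|)).sum := by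
    intro p1 acc
    rw [PySem.List.foldl_pyRange_zero_pyGetD' state ((0 : Int), (0 : Int))
        (fun td q => td + |(|p1.1 - q.1| + |p1.2 - q.2|) - 3|) acc,
      PySem.List.foldl_add]
  simp only [h1]
  rw [PySem.List.foldl_add]
  simp

-- running the suffix-sum loop from (sum, length, acc)
theorem pvFoldRun (s : List Int) (acc : Int) :
    (s.foldl (fun (st : Int × Int × Int) v =>
      let rem_sum := st.1 - v
      let rem_cnt := st.2.1 - 1
      (rem_sum, rem_cnt, st.2.2 + (rem_sum - rem_cnt * v)))
      (s.sum, (s.length : Int), acc)).2.2 = acc + pvHalfS s := by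
  induction s generalizing acc with
  | nil => simp [pvHalfS]
  | cons v t ih =>
    simp only [List.foldl_cons, List.sum_cons, List.length_cons, pvHalfS]
    push_cast
    rw [show ((v + t.sum - v : Int), ((t.length : Int) + 1) - 1,
        acc + (v + t.sum - v - ((t.length : Int) + 1 - 1) * v))
        = ((t.sum : Int), (t.length : Int), acc + (t.sum - t.length * v)) from by
      refine Prod.ext ?_ (Prod.ext ?_ ?_) <;> simp]
    rw [ih]
    ring

-- on a sorted list, twice pvHalfS is the ordered-pair |x - y| sum
theorem pvHalfS_spec (s : List Int) (h : s.Pairwise (· ≤ ·)) :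
    2 * pvHalfS s = (s.map (fun x => (s.map (fun y => |x - y|)).sum)).sum := by
  induction s with
  | nil => simp [pvHalfS]
  | cons v t ih =>
    rcases List.pairwise_cons.mp h with ⟨hv, ht⟩
    have habs1 : ∀ y ∈ t, |v - y| = y - v := by
      intro y hy; rw [abs_sub_comm, abs_of_nonneg (by have := hv y hy; omega)]
    have habs2 : ∀ x ∈ t, |x - v| = x - v := by
      intro x hx; rw [abs_of_nonneg (by have := hv x hx; omega)]
    have hsumv : (t.map (fun y => |v - y|)).sum = t.sum - t.length * v := by
      rw [List.map_congr_left habs1]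
      calc (t.map (fun y => y - v)).sum
          = (t.map (fun y => (fun y => y) y + (fun _ => -v) y)).sum := by simp [sub_eq_add_neg]
        _ = (t.map (fun y => y)).sum + (t.map (fun _ => -v)).sum := PySem.List.sum_map_add_int t _ _
        _ = t.sum + (t.length : Int) * (-v) := by rw [PySem.List.sum_map_const_int]; simp
        _ = t.sum - t.length * v := by ring
    simp only [List.map_cons, List.sum_cons]
    rw [List.map_congr_left (fun x hx => by simp only [habs2 x hx] :
        ∀ x ∈ t, (fun x => |x - v| + (t.map (fun y => |x - y|)).sum) x
          = (fun x => (x - v) + (t.map (fun y => |x - y|)).sum) x),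
      hsumv,
      PySem.List.sum_map_add_int t (fun x => x - v) (fun x => (t.map (fun y => |x - y|)).sum)]
    have hsub : (t.map (fun x => x - v)).sum = t.sum - t.length * v := by
      calc (t.map (fun y => y - v)).sum
          = (t.map (fun y => (fun y => y) y + (fun _ => -v) y)).sum := by simp [sub_eq_add_neg]
        _ = (t.map (fun y => y)).sum + (t.map (fun _ => -v)).sum := PySem.List.sum_map_add_int t _ _
        _ = t.sum + (t.length : Int) * (-v) := by rw [PySem.List.sum_map_const_int]; simp
        _ = t.sum - t.length * v := by ring
    rw [hsub, ← ih ht]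
    simp [pvHalfS]
    ring

theorem pvDSumPerm {α : Type} (l m : List α) (g : α → α → Int) (hp : l.Perm m) :
    (l.map (fun x => (l.map (g x)).sum)).sum = (m.map (fun x => (m.map (g x)).sum)).sum := by
  have hin : ∀ x, (l.map (g x)).sum = (m.map (g x)).sum := fun x => (hp.map (g x)).sum_eq
  rw [List.map_congr_left (fun x _ => hin x)]
  exact (hp.map _).sum_eq

-- pair_abs_sum(vals) is the ordered-pair |x - y| sum of vals
theorem pvPairAbsSum_spec (vals : List Int) :
    pvPairAbsSum vals.length vals =
      (vals.map (fun x => (vals.map (fun y => |x - y|)).sum)).sum := by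
  simp only [pvPairAbsSum]
  have hperm := PySem.List.sorted_perm vals (fun v => v) false
  set s := PySem.List.sorted vals (fun v => v) false with hs
  have hsum : vals.sum = s.sum := (hperm.sum_eq).symm
  have hlen : (vals.length : Int) = (s.length : Int) := by
    rw [PySem.List.length_sorted]
  rw [hsum, hlen, pvFoldRun s 0]
  rw [← pvDSumPerm s vals _ hperm]
  have hpw : s.Pairwise (· ≤ ·) := PySem.List.sorted_pairwise vals (fun v => v)
  rw [← pvHalfS_spec s hpw]
  ring

-- B's counter/offset loops compute the double sum of the near weights
theorem pvNear_eq (state : List (Int × Int)) :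
    (state.foldl (fun near p =>
      (PySem.List.pyRange (-2) 3 1).foldl (fun near dx =>
        (PySem.List.pyRange (-2) 3 1).foldl (fun near dy =>
          let w := 3 - |dx| - |dy|
          if w > 0 then near + w *
            (state.foldl (fun d p => d.insert p (d.getD p 0 + 1)) PySem.Dict.empty).getD
              (p.1 + dx, p.2 + dy) 0 else near) near) near) 0)
      = pvDSum state pvG := by
  simp only [PySem.Dict.foldl_insert_getD_add_one_eq_counter, PySem.Dict.getD_counter]
  have hdy : ∀ (p : Int × Int) (dx near : Int),
      (PySem.List.pyRange (-2) 3 1).foldl (fun near dy =>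
        if 3 - |dx| - |dy| > 0 then
          near + (3 - |dx| - |dy|) * ((state.count (p.1 + dx, p.2 + dy) : Nat) : Int)
        else near) near
      = near + ((PySem.List.pyRange (-2) 3 1).map (fun dy =>
          if 3 - |dx| - |dy| > 0 then
            (3 - |dx| - |dy|) * ((state.count (p.1 + dx, p.2 + dy) : Nat) : Int)
          else 0)).sum :=
    fun p dx near => pvFoldlIteAdd _ _ _ _
  have hdx : ∀ (p : Int × Int) (near : Int),
      (PySem.List.pyRange (-2) 3 1).foldl (fun near dx =>
        (PySem.List.pyRange (-2) 3 1).foldl (fun near dy =>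
          if 3 - |dx| - |dy| > 0 then
            near + (3 - |dx| - |dy|) * ((state.count (p.1 + dx, p.2 + dy) : Nat) : Int)
          else near) near) near
      = near + ((PySem.List.pyRange (-2) 3 1).map (fun dx =>
          ((PySem.List.pyRange (-2) 3 1).map (fun dy =>
            if 3 - |dx| - |dy| > 0 then
              (3 - |dx| - |dy|) * ((state.count (p.1 + dx, p.2 + dy) : Nat) : Int)
            else 0)).sum)).sum := by
    intro p near
    rw [show (fun (near dx : Int) =>
        (PySem.List.pyRange (-2) 3 1).foldl (fun near dy =>
          if 3 - |dx| - |dy| > 0 then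
            near + (3 - |dx| - |dy|) * ((state.count (p.1 + dx, p.2 + dy) : Nat) : Int)
          else near) near)
      = fun (near dx : Int) => near + ((PySem.List.pyRange (-2) 3 1).map (fun dy =>
          if 3 - |dx| - |dy| > 0 then
            (3 - |dx| - |dy|) * ((state.count (p.1 + dx, p.2 + dy) : Nat) : Int)
          else 0)).sum from funext fun near => funext fun dx => hdy p dx near]
    exact PySem.List.foldl_add _ _ _
  rw [show (fun (near : Int) (p : Int × Int) =>
      (PySem.List.pyRange (-2) 3 1).foldl (fun near dx =>
        (PySem.List.pyRange (-2) 3 1).foldl (fun near dy =>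
          if 3 - |dx| - |dy| > 0 then
            near + (3 - |dx| - |dy|) * ((state.count (p.1 + dx, p.2 + dy) : Nat) : Int)
          else near) near) near)
    = fun (near : Int) (p : Int × Int) => near + ((PySem.List.pyRange (-2) 3 1).map (fun dx =>
        ((PySem.List.pyRange (-2) 3 1).map (fun dy =>
          if 3 - |dx| - |dy| > 0 then
            (3 - |dx| - |dy|) * ((state.count (p.1 + dx, p.2 + dy) : Nat) : Int)
          else 0)).sum)).sum from funext fun near => funext fun p => hdx p near]
  rw [PySem.List.foldl_add, zero_add]
  unfold pvDSum
  apply congrArg List.sum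
  apply List.map_congr_left
  intro p _
  have hterm : ∀ dx dy : Int,
      (if 3 - |dx| - |dy| > 0 then
        (3 - |dx| - |dy|) * ((state.count (p.1 + dx, p.2 + dy) : Nat) : Int) else 0)
      = (state.map (fun q =>
          if 3 - |dx| - |dy| > 0 then
            (3 - |dx| - |dy|) * (if q = (p.1 + dx, p.2 + dy) then (1:Int) else 0)
          else 0)).sum := by
    intro dx dy
    by_cases hw : 3 - |dx| - |dy| > 0
    · rw [if_pos hw, pvCountSum, ← List.sum_map_mul_left]
      apply congrArg List.sum
      exact List.map_congr_left fun q _ => by rw [if_pos hw]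
    · rw [if_neg hw]
      symm
      exact List.sum_eq_zero fun x hx => by
        rcases List.mem_map.mp hx with ⟨q, _, rfl⟩
        rw [if_neg hw]
  calc ((PySem.List.pyRange (-2) 3 1).map (fun dx =>
          ((PySem.List.pyRange (-2) 3 1).map (fun dy =>
            if 3 - |dx| - |dy| > 0 then
              (3 - |dx| - |dy|) * ((state.count (p.1 + dx, p.2 + dy) : Nat) : Int)
            else 0)).sum)).sum
      = ((PySem.List.pyRange (-2) 3 1).map (fun dx =>
          ((PySem.List.pyRange (-2) 3 1).map (fun dy =>
            (state.map (fun q =>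
              if 3 - |dx| - |dy| > 0 then
                (3 - |dx| - |dy|) * (if q = (p.1 + dx, p.2 + dy) then (1:Int) else 0)
              else 0)).sum)).sum)).sum := by
        apply congrArg List.sum
        refine List.map_congr_left fun dx _ => ?_
        apply congrArg List.sum
        exact List.map_congr_left fun dy _ => hterm dx dy
    _ = ((PySem.List.pyRange (-2) 3 1).map (fun dx =>
          (state.map (fun q =>
            ((PySem.List.pyRange (-2) 3 1).map (fun dy =>
              if 3 - |dx| - |dy| > 0 then
                (3 - |dx| - |dy|) * (if q = (p.1 + dx, p.2 + dy) then (1:Int) else 0)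
              else 0)).sum)).sum)).sum := by
        apply congrArg List.sum
        exact List.map_congr_left fun dx _ => pvSumComm _ state _
    _ = (state.map (fun q =>
          ((PySem.List.pyRange (-2) 3 1).map (fun dx =>
            ((PySem.List.pyRange (-2) 3 1).map (fun dy =>
              if 3 - |dx| - |dy| > 0 then
                (3 - |dx| - |dy|) * (if q = (p.1 + dx, p.2 + dy) then (1:Int) else 0)
              else 0)).sum)).sum)).sum := pvSumComm _ state _
    _ = (state.map (fun q => pvG p q)).sum := by
        apply congrArg List.sum
        refine List.map_congr_left fun q _ => ?_
        obtain ⟨q1, q2⟩ := q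
        rw [← pvL4 p.1 p.2 q1 q2]
        apply congrArg List.sum
        refine List.map_congr_left fun dx _ => ?_
        apply congrArg List.sum
        refine List.map_congr_left fun dy _ => ?_
        simp only [Prod.mk.injEq]

theorem pvPointwise (p q : Int × Int) :
    |(|p.1 - q.1| + |p.2 - q.2|) - 3|
      = |p.1 - q.1| + (|p.2 - q.2| + (-3 + 2 * pvG p q)) := by
  unfold pvG; simp only [Int.abs_eq_natAbs]; split <;> omega

theorem pvSum4 {α : Type} (l : List α) (a b g : α → Int) (c : Int) :
    (l.map (fun x => a x + (b x + (c + g x)))).sum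
      = (l.map a).sum + ((l.map b).sum + ((l.length : Int) * c + (l.map g).sum)) := by
  rw [PySem.List.sum_map_add_int l a _, PySem.List.sum_map_add_int l b _,
    PySem.List.sum_map_add_int l (fun _ => c) g, PySem.List.sum_map_const_int]

-- ===== VERDICT (by name: the statement is the Claim_ definition above) =====
theorem heuristic_HDOD_spec : Claim_equal_heuristic_HDOD := by
  intro state N _
  show heuristic_HDOD state N = heuristic_HDOD_alt state N
  rw [pvA_eq_dsum state N]
  -- split the double sum pointwise
  have hsplit : pvDSum state (fun p q => |(|p.1 - q.1| + |p.2 - q.2|) - 3|)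
      = pvDSum state (fun p q => |p.1 - q.1|) + pvDSum state (fun p q => |p.2 - q.2|)
        - 3 * ((state.length : Int) * (state.length : Int)) + 2 * pvDSum state pvG := by
    unfold pvDSum
    have hin : ∀ p : Int × Int,
        (state.map (fun q => |(|p.1 - q.1| + |p.2 - q.2|) - 3|)).sum
        = (state.map (fun q => |p.1 - q.1|)).sum + ((state.map (fun q => |p.2 - q.2|)).sum
          + ((state.length : Int) * (-3) + (state.map (fun q => 2 * pvG p q)).sum)) := by
      intro p
      rw [List.map_congr_left (fun q _ => pvPointwise p q), pvSum4]
    rw [List.map_congr_left (fun p (_ : p ∈ state) => hin p), pvSum4 state _ _ _ ((state.length : Int) * (-3))]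
    have h2 : (state.map (fun p => (state.map (fun q => 2 * pvG p q)).sum)).sum
        = 2 * (state.map (fun p => (state.map (fun q => pvG p q)).sum)).sum := by
      rw [← List.sum_map_mul_left]
      apply congrArg List.sum
      exact List.map_congr_left fun p _ => by rw [← List.sum_map_mul_left]
    rw [h2]
    ring
  rw [hsplit]
  -- identify B's pieces
  simp only [heuristic_HDOD_alt]
  rw [← pvNear_eq state]
  have hx : pvPairAbsSum (state.length : Int) (state.map (·.1))
      = pvDSum state (fun p q => |p.1 - q.1|) := by
    rw [show ((state.length : Int)) = ((state.map (·.1)).length : Int) by rw [List.length_map],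
      pvPairAbsSum_spec (state.map (·.1))]
    unfold pvDSum
    rw [List.map_map]
    apply congrArg List.sum
    refine List.map_congr_left fun p _ => ?_
    simp only [Function.comp]
    rw [List.map_map]
    rfl
  have hy : pvPairAbsSum (state.length : Int) (state.map (·.2))
      = pvDSum state (fun p q => |p.2 - q.2|) := by
    rw [show ((state.length : Int)) = ((state.map (·.2)).length : Int) by rw [List.length_map],
      pvPairAbsSum_spec (state.map (·.2))]
    unfold pvDSum
    rw [List.map_map]
    apply congrArg List.sum
    refine List.map_congr_left fun p _ => ?_
    simp only [Function.comp]
    rw [List.map_map]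
    rfl
  rw [hx, hy]
  ring
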